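-- pv_equiv track=rewrite | github.com/cleaner-bot/cleaner-bot | clend/guild/components/rules/ping.py | has_unescaped
-- ===== SOURCE A (Python) =====
-- def has_unescaped(content: str, key: str) -> bool:
--     current_position: int | None = None
--     while current_position is None or current_position < len(content):
--         try:
--             current_position = content.index(
--                 key, None if current_position is None else current_position + 1
--             )
--         except ValueError:
--             break
--         before, after = content[:current_position], content[current_position:]
--         if before.count("`") % 2 == 0:
--             return True
--         elif after.count("`") == 0:
--             return True
--
--     return False
-- ===== SOURCE B (Python) =====
-- def has_unescaped(content: str, key: str) -> bool:
--     # Single left-to-right pass: running count of backticks before i, plus the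
--     # total once; each candidate position is checked in O(|key|).
--     total = content.count("`")
--     prefix = 0
--     for i in range(len(content) + 1):
--         if content.startswith(key, i) and (prefix % 2 == 0 or total == prefix):
--             return True
--         if i < len(content) and content[i] == "`":
--             prefix += 1
--     return False
-- ===== Notes on version B (the rewrite author's own statement) =====
-- stated objective: alternative
-- what changed: Replaces the repeated index()/count() rescans per occurrence (quadratic worst case) with a single left-to-right pass maintaining a running backtick count plus the precomputed total, checking each position in O(1) beyond the substring match.
import Mathlib
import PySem

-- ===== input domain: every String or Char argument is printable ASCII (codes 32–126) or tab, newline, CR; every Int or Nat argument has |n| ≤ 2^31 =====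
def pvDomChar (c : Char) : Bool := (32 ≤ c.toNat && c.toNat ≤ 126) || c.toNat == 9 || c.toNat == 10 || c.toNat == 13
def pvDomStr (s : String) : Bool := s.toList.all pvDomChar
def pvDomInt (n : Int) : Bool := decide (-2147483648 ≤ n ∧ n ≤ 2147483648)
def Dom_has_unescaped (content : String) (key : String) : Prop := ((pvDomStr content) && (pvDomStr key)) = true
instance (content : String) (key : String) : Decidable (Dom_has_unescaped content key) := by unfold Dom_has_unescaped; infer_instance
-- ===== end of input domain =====

-- B does the same check in a single left-to-right pass with a running backtick count (objective: alternative).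

-- ===== PORT A =====
-- content.index(key, start): first i ≥ start with content[i:i+len(key)] == key, scanning upward
-- (exact for the nonnegative starts A uses; none = ValueError)
def pvFindFrom (cs ks : List Char) (start : Nat) : Option Nat :=
  if _h : start ≤ cs.length then
    if (cs.drop start).take ks.length == ks then some start
    else pvFindFrom cs ks (start + 1)
  else none
termination_by cs.length + 1 - start

-- needed by pvLoopA's termination proof
theorem pvFindFrom_bounds (cs ks : List Char) (start : Nat) {p : Nat}
    (h : pvFindFrom cs ks start = some p) : start ≤ p ∧ p ≤ cs.length := by
  fun_induction pvFindFrom cs ks start with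
  | case1 start h1 h2 => simp at h; omega
  | case2 start h1 h2 ih => have := ih h; omega
  | case3 start h1 => simp at h

-- the while-loop of A; start is the next search start ("None" = 0)
def pvLoopA (cs ks : List Char) (start : Nat) : Bool :=
  match h : pvFindFrom cs ks start with
  | none => false                                     -- ValueError: break
  | some p =>
    if (cs.take p).count '`' % 2 == 0 then true       -- before.count("`") % 2 == 0
    else if (cs.drop p).count '`' == 0 then true      -- after.count("`") == 0
    else if p + 1 ≤ cs.length then pvLoopA cs ks (p + 1)   -- while current_position < len(content)
    else false
termination_by cs.length + 1 - start
decreasing_by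
  have := pvFindFrom_bounds cs ks start h
  omega

def has_unescaped (content : String) (key : String) : Bool :=
  pvLoopA content.toList key.toList 0

-- ===== PORT B =====
-- the for-loop of Source B over i = 0 .. len(content): total/pref are the backtick counts;
-- content.startswith(key, i) is (suffix.take ks.length == ks); the [] case is i = len(content)
def pvLoopB (ks : List Char) (total pref : Nat) : List Char → Bool
  | [] => ks == [] && (pref % 2 == 0 || total == pref)
  | c :: rest =>
    if (c :: rest).take ks.length == ks && (pref % 2 == 0 || total == pref) then true
    else pvLoopB ks total (if c == '`' then pref + 1 else pref) rest

def has_unescaped_alt (content : String) (key : String) : Bool :=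
  pvLoopB key.toList (content.toList.count '`') 0 content.toList

-- ===== PRECONDITION & SPEC =====
def Spec_has_unescaped (content : String) (key : String) (out : Bool) : Prop := out = has_unescaped_alt content key
instance (content : String) (key : String) (out : Bool) : Decidable (Spec_has_unescaped content key out) := by unfold Spec_has_unescaped; infer_instance

-- ===== CLAIM (what is proved, stated in full; the proofs are below) =====
def Claim_equal_has_unescaped : Prop := ∀ (content : String) (key : String), Dom_has_unescaped content key → Spec_has_unescaped content key (has_unescaped content key)

-- ===== LEMMAS AND PROOFS =====

-- common reference form: structural scan carrying the prefix backtick count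
def pvChk (ks : List Char) (pref : Nat) : List Char → Bool
  | [] => decide (ks = [])
  | c :: rest =>
    ((c :: rest).take ks.length == ks && (pref % 2 == 0 || (c :: rest).count '`' == 0))
      || pvChk ks (if c == '`' then pref + 1 else pref) rest

theorem pvLoopB_eq_chk (ks : List Char) (total : Nat) :
    ∀ (l : List Char) (pref : Nat), pref + l.count '`' = total →
      pvLoopB ks total pref l = pvChk ks pref l := by
  intro l
  induction l with
  | nil =>
    intro pref hinv
    have h : total = pref := by simp at hinv; omega
    subst h
    cases ks <;> simp [pvLoopB, pvChk]
  | cons c rest ih =>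
    intro pref hinv
    have heq : (total == pref) = ((c :: rest).count '`' == 0) := by
      by_cases h : (c :: rest).count '`' = 0
      · simp [h]; omega
      · simp [h]; omega
    have hrec : pvLoopB ks total (if c == '`' then pref + 1 else pref) rest
        = pvChk ks (if c == '`' then pref + 1 else pref) rest := by
      apply ih
      have hcnt : (c :: rest).count '`' = rest.count '`' + (if c == '`' then 1 else 0) := by
        simp [List.count_cons]
      by_cases hc : c == '`' <;> simp [hc] at hcnt ⊢ <;> omega
    rw [pvLoopB, pvChk, heq, hrec]
    by_cases hm : ((c :: rest).take ks.length == ks && (pref % 2 == 0 || (c :: rest).count '`' == 0)) = true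
    · simp [hm]
    · simp only [Bool.not_eq_true] at hm
      simp [hm]

theorem pvLoopA_eq_chk (cs ks : List Char) :
    ∀ (n start : Nat), cs.length + 1 - start = n → start ≤ cs.length →
      pvLoopA cs ks start = pvChk ks ((cs.take start).count '`') (cs.drop start) := by
  intro n
  induction n with
  | zero => intro start h1 h2; omega
  | succ n ih =>
    intro start h1 h2
    by_cases hm : ((cs.drop start).take ks.length == ks) = true
    · -- match at start → pvFindFrom start = some start
      have hfind : pvFindFrom cs ks start = some start := by
        rw [pvFindFrom]; simp [h2, hm]
      rw [pvLoopA, hfind]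
      by_cases hlen : start = cs.length
      · -- end position: key must be empty, "after" has no backticks
        subst hlen
        have hdrop : cs.drop cs.length = ([] : List Char) := by simp
        rw [hdrop] at hm
        have hks : ks = [] := by simp at hm; exact hm
        simp [hdrop, pvChk, hks]
      · have hlt : start < cs.length := by omega
        have hdrop : cs.drop start = cs[start] :: cs.drop (start + 1) := by
          rw [List.drop_eq_getElem_cons hlt]
        have hpref' : (if cs[start] == '`' then (cs.take start).count '`' + 1 else (cs.take start).count '`')
            = (cs.take (start + 1)).count '`' := by
          rw [List.take_succ_eq_append_getElem hlt, List.count_append, List.count_singleton]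
          by_cases hc : cs[start] == '`' <;> simp [hc]
        have hIH := ih (start + 1) (by omega) hlt
        conv_rhs => rw [hdrop, pvChk, ← hdrop]
        rw [hm]
        by_cases he : ((cs.take start).count '`' % 2 == 0) = true
        · simp [he]
        · simp only [Bool.not_eq_true] at he
          by_cases hz : ((cs.drop start).count '`' == 0) = true
          · simp [he, hz]
          · simp only [Bool.not_eq_true] at hz
            have hpref2 : (if cs[start] = '`' then (cs.take start).count '`' + 1 else (cs.take start).count '`')
                = (cs.take (start + 1)).count '`' := by
              rw [← hpref']; by_cases hc : cs[start] = '`' <;> simp [hc]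
            simp [he, hz, hlt, hIH, hpref2]
    · -- no match at start → pvFindFrom start = pvFindFrom (start + 1)
      simp only [Bool.not_eq_true] at hm
      have hfind : pvFindFrom cs ks start = pvFindFrom cs ks (start + 1) := by
        rw [pvFindFrom]; simp [h2, hm]
      by_cases hlen : start = cs.length
      · subst hlen
        have hnone : pvFindFrom cs ks (cs.length + 1) = none := by
          rw [pvFindFrom]; simp
        rw [pvLoopA, hfind, hnone]
        have hdrop : cs.drop cs.length = ([] : List Char) := by simp
        rw [hdrop] at hm
        have hks : ¬ ks = [] := by intro h; subst h; simp at hm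
        simp [hdrop, pvChk, hks]
      · have hlt : start < cs.length := by omega
        have hstep : pvLoopA cs ks start = pvLoopA cs ks (start + 1) := by
          rw [pvLoopA, hfind, pvLoopA]
        rw [hstep, ih (start + 1) (by omega) hlt]
        have hdrop : cs.drop start = cs[start] :: cs.drop (start + 1) := by
          rw [List.drop_eq_getElem_cons hlt]
        have hpref' : (if cs[start] == '`' then (cs.take start).count '`' + 1 else (cs.take start).count '`')
            = (cs.take (start + 1)).count '`' := by
          rw [List.take_succ_eq_append_getElem hlt, List.count_append, List.count_singleton]
          by_cases hc : cs[start] == '`' <;> simp [hc]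
        conv_rhs => rw [hdrop, pvChk, ← hdrop]
        rw [hm]
        simp only [Bool.false_and, Bool.false_or]
        rw [hpref']

-- ===== VERDICT (by name: the statement is the Claim_ definition above) =====
theorem has_unescaped_spec : Claim_equal_has_unescaped := by
  intro content key _hdom
  unfold Spec_has_unescaped has_unescaped has_unescaped_alt
  rw [pvLoopA_eq_chk content.toList key.toList (content.toList.length + 1) 0 rfl (by omega)]
  rw [pvLoopB_eq_chk key.toList (content.toList.count '`') content.toList 0 (by omega)]
  simp
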